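-- pv_equiv track=rewrite | github.com/AheadAviation/nautobot_network_provisioning | nautobot_network_provisioning/services/troubleshooting/steps/path_tracing.py | _format_interface_label
-- ===== SOURCE A (Python) =====
-- from typing import Any, Dict, List, Optional, Set, Tuple
--
-- def _format_interface_label(name: Optional[str]) -> Optional[str]:
--     """Return a normalized short-form interface label when possible."""
--
--     if not isinstance(name, str):
--         return None
--     token = name.strip()
--     if not token:
--         return None
--
--     collapsed = token.replace(" ", "")
--     lower = collapsed.lower()
--     mapping = [
--         ("port-channel", "Po"),
--         ("portchannel", "Po"),
--         ("bundle-ether", "BE"),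
--         ("gigabitethernet", "Gi"),
--         ("tengigabitethernet", "Te"),
--         ("fortygigabitethernet", "Fo"),
--         ("hundredgigabitethernet", "Hu"),
--         ("fastethernet", "Fa"),
--         ("ethernet", "Eth"),
--     ]
--     for prefix, short in mapping:
--         if lower.startswith(prefix):
--             suffix = collapsed[len(prefix) :]
--             return short + suffix
--     return token
-- ===== SOURCE B (Python) =====
-- _PAIRS = [
--     ("port-channel", "Po"),
--     ("portchannel", "Po"),
--     ("bundle-ether", "BE"),
--     ("gigabitethernet", "Gi"),
--     ("tengigabitethernet", "Te"),
--     ("fortygigabitethernet", "Fo"),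
--     ("hundredgigabitethernet", "Hu"),
--     ("fastethernet", "Fa"),
--     ("ethernet", "Eth"),
-- ]
--
--
-- def _build_trie(pairs):
--     root = {}
--     for prefix, short in pairs:
--         node = root
--         for ch in prefix:
--             node = node.setdefault(ch, {})
--         node[""] = short  # terminal marker: short form for this prefix
--     return root
--
--
-- _TRIE = _build_trie(_PAIRS)
--
--
-- def _format_interface_label(name):
--     """Return a normalized short-form interface label when possible."""
--     if not isinstance(name, str):
--         return None
--     token = name.strip()
--     if not token:
--         return None
--     collapsed = token.replace(" ", "")
--     lower = collapsed.lower()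
--     # Walk the prefix trie character by character; no known prefix is a
--     # prefix of another, so the first terminal reached is the unique match.
--     node = _TRIE
--     for i, ch in enumerate(lower):
--         node = node.get(ch)
--         if node is None:
--             break
--         short = node.get("")
--         if short is not None:
--             return short + collapsed[i + 1:]
--     return token
-- ===== Notes on version B (the rewrite author's own statement) =====
-- stated objective: alternative
-- what changed: A scans the 9 (prefix, short) pairs testing startswith one by one; B builds a character trie of the prefixes once and walks the lowered string character by character through it, returning the short form at the first terminal node reached (correct because no known prefix is a prefix of another).
import Mathlib
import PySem

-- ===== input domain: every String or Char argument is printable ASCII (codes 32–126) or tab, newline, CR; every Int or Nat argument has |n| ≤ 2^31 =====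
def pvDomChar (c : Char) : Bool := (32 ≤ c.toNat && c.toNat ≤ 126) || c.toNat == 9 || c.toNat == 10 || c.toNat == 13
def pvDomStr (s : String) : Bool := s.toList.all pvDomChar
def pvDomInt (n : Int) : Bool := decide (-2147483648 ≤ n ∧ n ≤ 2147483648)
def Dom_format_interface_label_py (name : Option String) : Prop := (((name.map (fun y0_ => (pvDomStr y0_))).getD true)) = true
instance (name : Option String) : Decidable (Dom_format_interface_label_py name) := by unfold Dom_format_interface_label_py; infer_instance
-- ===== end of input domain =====

-- B replaces A's linear startswith scan over the 9 (prefix, short) pairs with a single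
-- character-by-character walk of a prefix trie built once (objective: alternative).

-- ===== PORT A =====
-- the `mapping` list of A, in A's order (string literals written as char lists)
def pvMappingA : List (List Char × List Char) :=
  [(['p', 'o', 'r', 't', '-', 'c', 'h', 'a', 'n', 'n', 'e', 'l'], ['P', 'o']),
   (['p', 'o', 'r', 't', 'c', 'h', 'a', 'n', 'n', 'e', 'l'], ['P', 'o']),
   (['b', 'u', 'n', 'd', 'l', 'e', '-', 'e', 't', 'h', 'e', 'r'], ['B', 'E']),
   (['g', 'i', 'g', 'a', 'b', 'i', 't', 'e', 't', 'h', 'e', 'r', 'n', 'e', 't'], ['G', 'i']),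
   (['t', 'e', 'n', 'g', 'i', 'g', 'a', 'b', 'i', 't', 'e', 't', 'h', 'e', 'r', 'n', 'e', 't'], ['T', 'e']),
   (['f', 'o', 'r', 't', 'y', 'g', 'i', 'g', 'a', 'b', 'i', 't', 'e', 't', 'h', 'e', 'r', 'n', 'e', 't'], ['F', 'o']),
   (['h', 'u', 'n', 'd', 'r', 'e', 'd', 'g', 'i', 'g', 'a', 'b', 'i', 't', 'e', 't', 'h', 'e', 'r', 'n', 'e', 't'], ['H', 'u']),
   (['f', 'a', 's', 't', 'e', 't', 'h', 'e', 'r', 'n', 'e', 't'], ['F', 'a']),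
   (['e', 't', 'h', 'e', 'r', 'n', 'e', 't'], ['E', 't', 'h'])]

-- A's `for prefix, short in mapping:` loop; `none` = the loop fell through
def pvLoopA (lower collapsed : List Char) : List (List Char × List Char) → Option (List Char)
  | [] => none
  | (p, s) :: rest =>
      if PySem.Chars.startswith lower p then
        some (s ++ PySem.List.slice collapsed (some (p.length : Int)) none)   -- collapsed[len(prefix):]
      else pvLoopA lower collapsed rest

def format_interface_label_py (name : Option String) : Option String :=
  match name with
  | none => none                                   -- not isinstance(name, str)
  | some s =>
      let token := PySem.Chars.strip s.toList
      if token = [] then none                      -- if not token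
      else
        let collapsed := PySem.Chars.replace token " ".toList "".toList
        let lower := PySem.Chars.lower collapsed
        match pvLoopA lower collapsed pvMappingA with
        | some r => some (String.ofList r)
        | none => some (String.ofList token)

-- ===== PORT B =====
-- B's trie _TRIE = _build_trie(_PAIRS), ported as an index-encoded node table (exact:
-- node k = (terminal short form if any, children as (char, node index) pairs), node 0 = root,
-- nodes numbered in the order _build_trie allocates them).
def pvNodes : List (Option (List Char) × List (Char × Nat)) :=
 [
  (none, [('p', 1), ('b', 20), ('g', 32), ('t', 47), ('f', 65), ('h', 85), ('e', 118)]),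
  (none, [('o', 2)]),
  (none, [('r', 3)]),
  (none, [('t', 4)]),
  (none, [('-', 5), ('c', 13)]),
  (none, [('c', 6)]),
  (none, [('h', 7)]),
  (none, [('a', 8)]),
  (none, [('n', 9)]),
  (none, [('n', 10)]),
  (none, [('e', 11)]),
  (none, [('l', 12)]),
  (some ['P', 'o'], []),
  (none, [('h', 14)]),
  (none, [('a', 15)]),
  (none, [('n', 16)]),
  (none, [('n', 17)]),
  (none, [('e', 18)]),
  (none, [('l', 19)]),
  (some ['P', 'o'], []),
  (none, [('u', 21)]),
  (none, [('n', 22)]),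
  (none, [('d', 23)]),
  (none, [('l', 24)]),
  (none, [('e', 25)]),
  (none, [('-', 26)]),
  (none, [('e', 27)]),
  (none, [('t', 28)]),
  (none, [('h', 29)]),
  (none, [('e', 30)]),
  (none, [('r', 31)]),
  (some ['B', 'E'], []),
  (none, [('i', 33)]),
  (none, [('g', 34)]),
  (none, [('a', 35)]),
  (none, [('b', 36)]),
  (none, [('i', 37)]),
  (none, [('t', 38)]),
  (none, [('e', 39)]),
  (none, [('t', 40)]),
  (none, [('h', 41)]),
  (none, [('e', 42)]),
  (none, [('r', 43)]),
  (none, [('n', 44)]),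
  (none, [('e', 45)]),
  (none, [('t', 46)]),
  (some ['G', 'i'], []),
  (none, [('e', 48)]),
  (none, [('n', 49)]),
  (none, [('g', 50)]),
  (none, [('i', 51)]),
  (none, [('g', 52)]),
  (none, [('a', 53)]),
  (none, [('b', 54)]),
  (none, [('i', 55)]),
  (none, [('t', 56)]),
  (none, [('e', 57)]),
  (none, [('t', 58)]),
  (none, [('h', 59)]),
  (none, [('e', 60)]),
  (none, [('r', 61)]),
  (none, [('n', 62)]),
  (none, [('e', 63)]),
  (none, [('t', 64)]),
  (some ['T', 'e'], []),
  (none, [('o', 66), ('a', 107)]),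
  (none, [('r', 67)]),
  (none, [('t', 68)]),
  (none, [('y', 69)]),
  (none, [('g', 70)]),
  (none, [('i', 71)]),
  (none, [('g', 72)]),
  (none, [('a', 73)]),
  (none, [('b', 74)]),
  (none, [('i', 75)]),
  (none, [('t', 76)]),
  (none, [('e', 77)]),
  (none, [('t', 78)]),
  (none, [('h', 79)]),
  (none, [('e', 80)]),
  (none, [('r', 81)]),
  (none, [('n', 82)]),
  (none, [('e', 83)]),
  (none, [('t', 84)]),
  (some ['F', 'o'], []),
  (none, [('u', 86)]),
  (none, [('n', 87)]),
  (none, [('d', 88)]),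
  (none, [('r', 89)]),
  (none, [('e', 90)]),
  (none, [('d', 91)]),
  (none, [('g', 92)]),
  (none, [('i', 93)]),
  (none, [('g', 94)]),
  (none, [('a', 95)]),
  (none, [('b', 96)]),
  (none, [('i', 97)]),
  (none, [('t', 98)]),
  (none, [('e', 99)]),
  (none, [('t', 100)]),
  (none, [('h', 101)]),
  (none, [('e', 102)]),
  (none, [('r', 103)]),
  (none, [('n', 104)]),
  (none, [('e', 105)]),
  (none, [('t', 106)]),
  (some ['H', 'u'], []),
  (none, [('s', 108)]),
  (none, [('t', 109)]),
  (none, [('e', 110)]),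
  (none, [('t', 111)]),
  (none, [('h', 112)]),
  (none, [('e', 113)]),
  (none, [('r', 114)]),
  (none, [('n', 115)]),
  (none, [('e', 116)]),
  (none, [('t', 117)]),
  (some ['F', 'a'], []),
  (none, [('t', 119)]),
  (none, [('h', 120)]),
  (none, [('e', 121)]),
  (none, [('r', 122)]),
  (none, [('n', 123)]),
  (none, [('e', 124)]),
  (none, [('t', 125)]),
  (some ['E', 't', 'h'], [])]


-- B's `for i, ch in enumerate(lower):` walk: descend via node.get(ch), stop at a terminal
def pvWalk (collapsed : List Char) : Nat → Nat → List Char → Option (List Char)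
  | _, _, [] => none
  | n, i, c :: rest =>
      match ((pvNodes.getD n (none, [])).2).lookup c with      -- node.get(ch)
      | none => none                                           -- break
      | some n' =>
          match (pvNodes.getD n' (none, [])).1 with            -- node.get("")
          | some short => some (short ++ PySem.List.slice collapsed (some ((i + 1 : Nat) : Int)) none)  -- short + collapsed[i+1:]
          | none => pvWalk collapsed n' (i + 1) rest

def format_interface_label_py_alt (name : Option String) : Option String :=
  match name with
  | none => none
  | some s =>
      let token := PySem.Chars.strip s.toList
      if token = [] then none
      else
        let collapsed := PySem.Chars.replace token " ".toList "".toList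
        let lower := PySem.Chars.lower collapsed
        match pvWalk collapsed 0 0 lower with
        | some r => some (String.ofList r)
        | none => some (String.ofList token)

-- ===== PRECONDITION & SPEC =====
def Spec_format_interface_label_py (name : Option String) (out : Option String) : Prop := out = format_interface_label_py_alt name
instance (name : Option String) (out : Option String) : Decidable (Spec_format_interface_label_py name out) := by unfold Spec_format_interface_label_py; infer_instance

-- ===== CLAIM (what is proved, stated in full; the proofs are below) =====
def Claim_equal_format_interface_label_py : Prop := ∀ (name : Option String), Dom_format_interface_label_py name → Spec_format_interface_label_py name (format_interface_label_py name)

-- ===== LEMMAS AND PROOFS =====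

-- the path (sequence of characters) leading from the root to each trie node
def pvPaths : List (List Char) :=
 [
  [],
  ['p'],
  ['p', 'o'],
  ['p', 'o', 'r'],
  ['p', 'o', 'r', 't'],
  ['p', 'o', 'r', 't', '-'],
  ['p', 'o', 'r', 't', '-', 'c'],
  ['p', 'o', 'r', 't', '-', 'c', 'h'],
  ['p', 'o', 'r', 't', '-', 'c', 'h', 'a'],
  ['p', 'o', 'r', 't', '-', 'c', 'h', 'a', 'n'],
  ['p', 'o', 'r', 't', '-', 'c', 'h', 'a', 'n', 'n'],
  ['p', 'o', 'r', 't', '-', 'c', 'h', 'a', 'n', 'n', 'e'],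
  ['p', 'o', 'r', 't', '-', 'c', 'h', 'a', 'n', 'n', 'e', 'l'],
  ['p', 'o', 'r', 't', 'c'],
  ['p', 'o', 'r', 't', 'c', 'h'],
  ['p', 'o', 'r', 't', 'c', 'h', 'a'],
  ['p', 'o', 'r', 't', 'c', 'h', 'a', 'n'],
  ['p', 'o', 'r', 't', 'c', 'h', 'a', 'n', 'n'],
  ['p', 'o', 'r', 't', 'c', 'h', 'a', 'n', 'n', 'e'],
  ['p', 'o', 'r', 't', 'c', 'h', 'a', 'n', 'n', 'e', 'l'],
  ['b'],
  ['b', 'u'],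
  ['b', 'u', 'n'],
  ['b', 'u', 'n', 'd'],
  ['b', 'u', 'n', 'd', 'l'],
  ['b', 'u', 'n', 'd', 'l', 'e'],
  ['b', 'u', 'n', 'd', 'l', 'e', '-'],
  ['b', 'u', 'n', 'd', 'l', 'e', '-', 'e'],
  ['b', 'u', 'n', 'd', 'l', 'e', '-', 'e', 't'],
  ['b', 'u', 'n', 'd', 'l', 'e', '-', 'e', 't', 'h'],
  ['b', 'u', 'n', 'd', 'l', 'e', '-', 'e', 't', 'h', 'e'],
  ['b', 'u', 'n', 'd', 'l', 'e', '-', 'e', 't', 'h', 'e', 'r'],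
  ['g'],
  ['g', 'i'],
  ['g', 'i', 'g'],
  ['g', 'i', 'g', 'a'],
  ['g', 'i', 'g', 'a', 'b'],
  ['g', 'i', 'g', 'a', 'b', 'i'],
  ['g', 'i', 'g', 'a', 'b', 'i', 't'],
  ['g', 'i', 'g', 'a', 'b', 'i', 't', 'e'],
  ['g', 'i', 'g', 'a', 'b', 'i', 't', 'e', 't'],
  ['g', 'i', 'g', 'a', 'b', 'i', 't', 'e', 't', 'h'],
  ['g', 'i', 'g', 'a', 'b', 'i', 't', 'e', 't', 'h', 'e'],
  ['g', 'i', 'g', 'a', 'b', 'i', 't', 'e', 't', 'h', 'e', 'r'],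
  ['g', 'i', 'g', 'a', 'b', 'i', 't', 'e', 't', 'h', 'e', 'r', 'n'],
  ['g', 'i', 'g', 'a', 'b', 'i', 't', 'e', 't', 'h', 'e', 'r', 'n', 'e'],
  ['g', 'i', 'g', 'a', 'b', 'i', 't', 'e', 't', 'h', 'e', 'r', 'n', 'e', 't'],
  ['t'],
  ['t', 'e'],
  ['t', 'e', 'n'],
  ['t', 'e', 'n', 'g'],
  ['t', 'e', 'n', 'g', 'i'],
  ['t', 'e', 'n', 'g', 'i', 'g'],
  ['t', 'e', 'n', 'g', 'i', 'g', 'a'],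
  ['t', 'e', 'n', 'g', 'i', 'g', 'a', 'b'],
  ['t', 'e', 'n', 'g', 'i', 'g', 'a', 'b', 'i'],
  ['t', 'e', 'n', 'g', 'i', 'g', 'a', 'b', 'i', 't'],
  ['t', 'e', 'n', 'g', 'i', 'g', 'a', 'b', 'i', 't', 'e'],
  ['t', 'e', 'n', 'g', 'i', 'g', 'a', 'b', 'i', 't', 'e', 't'],
  ['t', 'e', 'n', 'g', 'i', 'g', 'a', 'b', 'i', 't', 'e', 't', 'h'],
  ['t', 'e', 'n', 'g', 'i', 'g', 'a', 'b', 'i', 't', 'e', 't', 'h', 'e'],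
  ['t', 'e', 'n', 'g', 'i', 'g', 'a', 'b', 'i', 't', 'e', 't', 'h', 'e', 'r'],
  ['t', 'e', 'n', 'g', 'i', 'g', 'a', 'b', 'i', 't', 'e', 't', 'h', 'e', 'r', 'n'],
  ['t', 'e', 'n', 'g', 'i', 'g', 'a', 'b', 'i', 't', 'e', 't', 'h', 'e', 'r', 'n', 'e'],
  ['t', 'e', 'n', 'g', 'i', 'g', 'a', 'b', 'i', 't', 'e', 't', 'h', 'e', 'r', 'n', 'e', 't'],
  ['f'],
  ['f', 'o'],
  ['f', 'o', 'r'],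
  ['f', 'o', 'r', 't'],
  ['f', 'o', 'r', 't', 'y'],
  ['f', 'o', 'r', 't', 'y', 'g'],
  ['f', 'o', 'r', 't', 'y', 'g', 'i'],
  ['f', 'o', 'r', 't', 'y', 'g', 'i', 'g'],
  ['f', 'o', 'r', 't', 'y', 'g', 'i', 'g', 'a'],
  ['f', 'o', 'r', 't', 'y', 'g', 'i', 'g', 'a', 'b'],
  ['f', 'o', 'r', 't', 'y', 'g', 'i', 'g', 'a', 'b', 'i'],
  ['f', 'o', 'r', 't', 'y', 'g', 'i', 'g', 'a', 'b', 'i', 't'],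
  ['f', 'o', 'r', 't', 'y', 'g', 'i', 'g', 'a', 'b', 'i', 't', 'e'],
  ['f', 'o', 'r', 't', 'y', 'g', 'i', 'g', 'a', 'b', 'i', 't', 'e', 't'],
  ['f', 'o', 'r', 't', 'y', 'g', 'i', 'g', 'a', 'b', 'i', 't', 'e', 't', 'h'],
  ['f', 'o', 'r', 't', 'y', 'g', 'i', 'g', 'a', 'b', 'i', 't', 'e', 't', 'h', 'e'],
  ['f', 'o', 'r', 't', 'y', 'g', 'i', 'g', 'a', 'b', 'i', 't', 'e', 't', 'h', 'e', 'r'],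
  ['f', 'o', 'r', 't', 'y', 'g', 'i', 'g', 'a', 'b', 'i', 't', 'e', 't', 'h', 'e', 'r', 'n'],
  ['f', 'o', 'r', 't', 'y', 'g', 'i', 'g', 'a', 'b', 'i', 't', 'e', 't', 'h', 'e', 'r', 'n', 'e'],
  ['f', 'o', 'r', 't', 'y', 'g', 'i', 'g', 'a', 'b', 'i', 't', 'e', 't', 'h', 'e', 'r', 'n', 'e', 't'],
  ['h'],
  ['h', 'u'],
  ['h', 'u', 'n'],
  ['h', 'u', 'n', 'd'],
  ['h', 'u', 'n', 'd', 'r'],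
  ['h', 'u', 'n', 'd', 'r', 'e'],
  ['h', 'u', 'n', 'd', 'r', 'e', 'd'],
  ['h', 'u', 'n', 'd', 'r', 'e', 'd', 'g'],
  ['h', 'u', 'n', 'd', 'r', 'e', 'd', 'g', 'i'],
  ['h', 'u', 'n', 'd', 'r', 'e', 'd', 'g', 'i', 'g'],
  ['h', 'u', 'n', 'd', 'r', 'e', 'd', 'g', 'i', 'g', 'a'],
  ['h', 'u', 'n', 'd', 'r', 'e', 'd', 'g', 'i', 'g', 'a', 'b'],
  ['h', 'u', 'n', 'd', 'r', 'e', 'd', 'g', 'i', 'g', 'a', 'b', 'i'],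
  ['h', 'u', 'n', 'd', 'r', 'e', 'd', 'g', 'i', 'g', 'a', 'b', 'i', 't'],
  ['h', 'u', 'n', 'd', 'r', 'e', 'd', 'g', 'i', 'g', 'a', 'b', 'i', 't', 'e'],
  ['h', 'u', 'n', 'd', 'r', 'e', 'd', 'g', 'i', 'g', 'a', 'b', 'i', 't', 'e', 't'],
  ['h', 'u', 'n', 'd', 'r', 'e', 'd', 'g', 'i', 'g', 'a', 'b', 'i', 't', 'e', 't', 'h'],
  ['h', 'u', 'n', 'd', 'r', 'e', 'd', 'g', 'i', 'g', 'a', 'b', 'i', 't', 'e', 't', 'h', 'e'],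
  ['h', 'u', 'n', 'd', 'r', 'e', 'd', 'g', 'i', 'g', 'a', 'b', 'i', 't', 'e', 't', 'h', 'e', 'r'],
  ['h', 'u', 'n', 'd', 'r', 'e', 'd', 'g', 'i', 'g', 'a', 'b', 'i', 't', 'e', 't', 'h', 'e', 'r', 'n'],
  ['h', 'u', 'n', 'd', 'r', 'e', 'd', 'g', 'i', 'g', 'a', 'b', 'i', 't', 'e', 't', 'h', 'e', 'r', 'n', 'e'],
  ['h', 'u', 'n', 'd', 'r', 'e', 'd', 'g', 'i', 'g', 'a', 'b', 'i', 't', 'e', 't', 'h', 'e', 'r', 'n', 'e', 't'],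
  ['f', 'a'],
  ['f', 'a', 's'],
  ['f', 'a', 's', 't'],
  ['f', 'a', 's', 't', 'e'],
  ['f', 'a', 's', 't', 'e', 't'],
  ['f', 'a', 's', 't', 'e', 't', 'h'],
  ['f', 'a', 's', 't', 'e', 't', 'h', 'e'],
  ['f', 'a', 's', 't', 'e', 't', 'h', 'e', 'r'],
  ['f', 'a', 's', 't', 'e', 't', 'h', 'e', 'r', 'n'],
  ['f', 'a', 's', 't', 'e', 't', 'h', 'e', 'r', 'n', 'e'],
  ['f', 'a', 's', 't', 'e', 't', 'h', 'e', 'r', 'n', 'e', 't'],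
  ['e'],
  ['e', 't'],
  ['e', 't', 'h'],
  ['e', 't', 'h', 'e'],
  ['e', 't', 'h', 'e', 'r'],
  ['e', 't', 'h', 'e', 'r', 'n'],
  ['e', 't', 'h', 'e', 'r', 'n', 'e'],
  ['e', 't', 'h', 'e', 'r', 'n', 'e', 't']]


theorem sw_iff (lo p : List Char) : (PySem.Chars.startswith lo p = true) ↔ lo.take p.length = p := by
  rw [PySem.Chars.startswith_iff, List.prefix_iff_eq_take, eq_comm]

theorem sw_iff' (lo p : List Char) (n : Nat) (hn : p.length = n) :
    (PySem.Chars.startswith lo p = true) ↔ lo.take n = p := by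
  subst hn; exact sw_iff lo p

theorem not_prefix_of_take_ne {p lo : List Char} {n : Nat} (hn : p.length = n)
    (h : lo.take n ≠ p) : ¬ (p <+: lo) := by
  subst hn
  intro hpre
  exact h (List.prefix_iff_eq_take.mp hpre).symm

theorem lookup_mem {c : Char} {n : Nat} : ∀ {l : List (Char × Nat)},
    l.lookup c = some n → (c, n) ∈ l := by
  intro l
  induction l with
  | nil => intro h; simp [List.lookup] at h
  | cons hd tl ih =>
      obtain ⟨k, v⟩ := hd
      intro h
      simp only [List.lookup] at h
      cases hk : c == k with
      | true =>
          rw [hk] at h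
          simp only [Option.some.injEq] at h
          have hc : c = k := beq_iff_eq.mp hk
          subst hc; subst h
          exact List.mem_cons_self
      | false =>
          rw [hk] at h
          exact List.mem_cons_of_mem _ (ih h)

theorem walk_hit1 (collapsed rest : List Char) :
    pvWalk collapsed 0 0 (['p', 'o', 'r', 't', '-', 'c', 'h', 'a', 'n', 'n', 'e', 'l'] ++ rest)
      = some (['P', 'o'] ++ PySem.List.slice collapsed (some (12 : Int)) none) := rfl

theorem walk_hit2 (collapsed rest : List Char) :
    pvWalk collapsed 0 0 (['p', 'o', 'r', 't', 'c', 'h', 'a', 'n', 'n', 'e', 'l'] ++ rest)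
      = some (['P', 'o'] ++ PySem.List.slice collapsed (some (11 : Int)) none) := rfl

theorem walk_hit3 (collapsed rest : List Char) :
    pvWalk collapsed 0 0 (['b', 'u', 'n', 'd', 'l', 'e', '-', 'e', 't', 'h', 'e', 'r'] ++ rest)
      = some (['B', 'E'] ++ PySem.List.slice collapsed (some (12 : Int)) none) := rfl

theorem walk_hit4 (collapsed rest : List Char) :
    pvWalk collapsed 0 0 (['g', 'i', 'g', 'a', 'b', 'i', 't', 'e', 't', 'h', 'e', 'r', 'n', 'e', 't'] ++ rest)
      = some (['G', 'i'] ++ PySem.List.slice collapsed (some (15 : Int)) none) := rfl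

theorem walk_hit5 (collapsed rest : List Char) :
    pvWalk collapsed 0 0 (['t', 'e', 'n', 'g', 'i', 'g', 'a', 'b', 'i', 't', 'e', 't', 'h', 'e', 'r', 'n', 'e', 't'] ++ rest)
      = some (['T', 'e'] ++ PySem.List.slice collapsed (some (18 : Int)) none) := rfl

theorem walk_hit6 (collapsed rest : List Char) :
    pvWalk collapsed 0 0 (['f', 'o', 'r', 't', 'y', 'g', 'i', 'g', 'a', 'b', 'i', 't', 'e', 't', 'h', 'e', 'r', 'n', 'e', 't'] ++ rest)
      = some (['F', 'o'] ++ PySem.List.slice collapsed (some (20 : Int)) none) := rfl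

theorem walk_hit7 (collapsed rest : List Char) :
    pvWalk collapsed 0 0 (['h', 'u', 'n', 'd', 'r', 'e', 'd', 'g', 'i', 'g', 'a', 'b', 'i', 't', 'e', 't', 'h', 'e', 'r', 'n', 'e', 't'] ++ rest)
      = some (['H', 'u'] ++ PySem.List.slice collapsed (some (22 : Int)) none) := rfl

theorem walk_hit8 (collapsed rest : List Char) :
    pvWalk collapsed 0 0 (['f', 'a', 's', 't', 'e', 't', 'h', 'e', 'r', 'n', 'e', 't'] ++ rest)
      = some (['F', 'a'] ++ PySem.List.slice collapsed (some (12 : Int)) none) := rfl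

theorem walk_hit9 (collapsed rest : List Char) :
    pvWalk collapsed 0 0 (['e', 't', 'h', 'e', 'r', 'n', 'e', 't'] ++ rest)
      = some (['E', 't', 'h'] ++ PySem.List.slice collapsed (some (8 : Int)) none) := rfl

set_option maxRecDepth 8000 in
-- every trie edge goes to an in-range node whose path extends the parent's path by that char
theorem trie_edges : ∀ n < 126, ∀ pr ∈ (pvNodes.getD n (none, [])).2,
    pr.2 < 126 ∧ pvPaths.getD pr.2 [] = pvPaths.getD n [] ++ [pr.1] := by decide

set_option maxRecDepth 8000 in
-- every terminal node's path is one of A's mapping prefixes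
theorem trie_terminal : ∀ n < 126, ((pvNodes.getD n (none, [])).1).isSome = true →
    pvPaths.getD n [] ∈ pvMappingA.map Prod.fst := by decide

theorem walk_none (collapsed : List Char) : ∀ (cs : List Char) (n i : Nat), n < 126 →
    (∀ p ∈ pvMappingA.map Prod.fst, ¬ (p <+: pvPaths.getD n [] ++ cs)) →
    pvWalk collapsed n i cs = none := by
  intro cs
  induction cs with
  | nil => intro n i _ _; rfl
  | cons c rest ih =>
      intro n i hn hp
      cases hl : List.lookup c ((pvNodes.getD n (none, [])).2) with
      | none => simp only [pvWalk, hl]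
      | some n' =>
          obtain ⟨hn', hpath⟩ := trie_edges n hn (c, n') (lookup_mem hl)
          have hstr : pvPaths.getD n [] ++ (c :: rest) = pvPaths.getD n' [] ++ rest := by
            rw [hpath, List.append_cons]
          cases hterm : (pvNodes.getD n' (none, [])).1 with
          | some s =>
              exfalso
              have hin := trie_terminal n' hn' (by rw [hterm]; rfl)
              exact hp _ hin (hstr ▸ List.prefix_append _ _)
          | none =>
              have hrec := ih n' (i + 1) hn' (by intro p hpmem; rw [← hstr]; exact hp p hpmem)
              simp only [pvWalk, hl, hterm]
              exact hrec

theorem loop_eq (lo collapsed : List Char) :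
    pvLoopA lo collapsed pvMappingA = pvWalk collapsed 0 0 lo := by
  have S1 := sw_iff' lo ['p', 'o', 'r', 't', '-', 'c', 'h', 'a', 'n', 'n', 'e', 'l'] 12 (by decide)
  have S2 := sw_iff' lo ['p', 'o', 'r', 't', 'c', 'h', 'a', 'n', 'n', 'e', 'l'] 11 (by decide)
  have S3 := sw_iff' lo ['b', 'u', 'n', 'd', 'l', 'e', '-', 'e', 't', 'h', 'e', 'r'] 12 (by decide)
  have S4 := sw_iff' lo ['g', 'i', 'g', 'a', 'b', 'i', 't', 'e', 't', 'h', 'e', 'r', 'n', 'e', 't'] 15 (by decide)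
  have S5 := sw_iff' lo ['t', 'e', 'n', 'g', 'i', 'g', 'a', 'b', 'i', 't', 'e', 't', 'h', 'e', 'r', 'n', 'e', 't'] 18 (by decide)
  have S6 := sw_iff' lo ['f', 'o', 'r', 't', 'y', 'g', 'i', 'g', 'a', 'b', 'i', 't', 'e', 't', 'h', 'e', 'r', 'n', 'e', 't'] 20 (by decide)
  have S7 := sw_iff' lo ['h', 'u', 'n', 'd', 'r', 'e', 'd', 'g', 'i', 'g', 'a', 'b', 'i', 't', 'e', 't', 'h', 'e', 'r', 'n', 'e', 't'] 22 (by decide)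
  have S8 := sw_iff' lo ['f', 'a', 's', 't', 'e', 't', 'h', 'e', 'r', 'n', 'e', 't'] 12 (by decide)
  have S9 := sw_iff' lo ['e', 't', 'h', 'e', 'r', 'n', 'e', 't'] 8 (by decide)
  by_cases h1 : lo.take 12 = ['p', 'o', 'r', 't', '-', 'c', 'h', 'a', 'n', 'n', 'e', 'l']
  · have hlo := (List.take_append_drop 12 lo).symm
    rw [h1] at hlo
    have hB : pvWalk collapsed 0 0 lo
        = some (['P', 'o'] ++ PySem.List.slice collapsed (some (12 : Int)) none) := by
      conv_lhs => rw [hlo]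
      exact walk_hit1 collapsed (lo.drop 12)
    rw [hB]
    simp [pvLoopA, pvMappingA, S1, h1]
  by_cases h2 : lo.take 11 = ['p', 'o', 'r', 't', 'c', 'h', 'a', 'n', 'n', 'e', 'l']
  · have hlo := (List.take_append_drop 11 lo).symm
    rw [h2] at hlo
    have hB : pvWalk collapsed 0 0 lo
        = some (['P', 'o'] ++ PySem.List.slice collapsed (some (11 : Int)) none) := by
      conv_lhs => rw [hlo]
      exact walk_hit2 collapsed (lo.drop 11)
    rw [hB]
    simp [pvLoopA, pvMappingA, S1, S2, h1, h2]
  by_cases h3 : lo.take 12 = ['b', 'u', 'n', 'd', 'l', 'e', '-', 'e', 't', 'h', 'e', 'r']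
  · have hlo := (List.take_append_drop 12 lo).symm
    rw [h3] at hlo
    have hB : pvWalk collapsed 0 0 lo
        = some (['B', 'E'] ++ PySem.List.slice collapsed (some (12 : Int)) none) := by
      conv_lhs => rw [hlo]
      exact walk_hit3 collapsed (lo.drop 12)
    rw [hB]
    simp [pvLoopA, pvMappingA, S1, S2, S3, h2, h3]
  by_cases h4 : lo.take 15 = ['g', 'i', 'g', 'a', 'b', 'i', 't', 'e', 't', 'h', 'e', 'r', 'n', 'e', 't']
  · have hlo := (List.take_append_drop 15 lo).symm
    rw [h4] at hlo
    have hB : pvWalk collapsed 0 0 lo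
        = some (['G', 'i'] ++ PySem.List.slice collapsed (some (15 : Int)) none) := by
      conv_lhs => rw [hlo]
      exact walk_hit4 collapsed (lo.drop 15)
    rw [hB]
    simp [pvLoopA, pvMappingA, S1, S2, S3, S4, h1, h2, h3, h4]
  by_cases h5 : lo.take 18 = ['t', 'e', 'n', 'g', 'i', 'g', 'a', 'b', 'i', 't', 'e', 't', 'h', 'e', 'r', 'n', 'e', 't']
  · have hlo := (List.take_append_drop 18 lo).symm
    rw [h5] at hlo
    have hB : pvWalk collapsed 0 0 lo
        = some (['T', 'e'] ++ PySem.List.slice collapsed (some (18 : Int)) none) := by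
      conv_lhs => rw [hlo]
      exact walk_hit5 collapsed (lo.drop 18)
    rw [hB]
    simp [pvLoopA, pvMappingA, S1, S2, S3, S4, S5, h1, h2, h3, h4, h5]
  by_cases h6 : lo.take 20 = ['f', 'o', 'r', 't', 'y', 'g', 'i', 'g', 'a', 'b', 'i', 't', 'e', 't', 'h', 'e', 'r', 'n', 'e', 't']
  · have hlo := (List.take_append_drop 20 lo).symm
    rw [h6] at hlo
    have hB : pvWalk collapsed 0 0 lo
        = some (['F', 'o'] ++ PySem.List.slice collapsed (some (20 : Int)) none) := by
      conv_lhs => rw [hlo]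
      exact walk_hit6 collapsed (lo.drop 20)
    rw [hB]
    simp [pvLoopA, pvMappingA, S1, S2, S3, S4, S5, S6, h1, h2, h3, h4, h5, h6]
  by_cases h7 : lo.take 22 = ['h', 'u', 'n', 'd', 'r', 'e', 'd', 'g', 'i', 'g', 'a', 'b', 'i', 't', 'e', 't', 'h', 'e', 'r', 'n', 'e', 't']
  · have hlo := (List.take_append_drop 22 lo).symm
    rw [h7] at hlo
    have hB : pvWalk collapsed 0 0 lo
        = some (['H', 'u'] ++ PySem.List.slice collapsed (some (22 : Int)) none) := by
      conv_lhs => rw [hlo]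
      exact walk_hit7 collapsed (lo.drop 22)
    rw [hB]
    simp [pvLoopA, pvMappingA, S1, S2, S3, S4, S5, S6, S7, h1, h2, h3, h4, h5, h6, h7]
  by_cases h8 : lo.take 12 = ['f', 'a', 's', 't', 'e', 't', 'h', 'e', 'r', 'n', 'e', 't']
  · have hlo := (List.take_append_drop 12 lo).symm
    rw [h8] at hlo
    have hB : pvWalk collapsed 0 0 lo
        = some (['F', 'a'] ++ PySem.List.slice collapsed (some (12 : Int)) none) := by
      conv_lhs => rw [hlo]
      exact walk_hit8 collapsed (lo.drop 12)
    rw [hB]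
    simp [pvLoopA, pvMappingA, S1, S2, S3, S4, S5, S6, S7, S8, h2, h4, h5, h6, h7, h8]
  by_cases h9 : lo.take 8 = ['e', 't', 'h', 'e', 'r', 'n', 'e', 't']
  · have hlo := (List.take_append_drop 8 lo).symm
    rw [h9] at hlo
    have hB : pvWalk collapsed 0 0 lo
        = some (['E', 't', 'h'] ++ PySem.List.slice collapsed (some (8 : Int)) none) := by
      conv_lhs => rw [hlo]
      exact walk_hit9 collapsed (lo.drop 8)
    rw [hB]
    simp [pvLoopA, pvMappingA, S1, S2, S3, S4, S5, S6, S7, S8, S9, h1, h2, h3, h4, h5, h6, h7, h8, h9]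
  have hnone : pvWalk collapsed 0 0 lo = none := by
    apply walk_none collapsed lo 0 0 (by norm_num)
    intro p hp
    rw [show pvPaths.getD 0 [] = [] from rfl, List.nil_append]
    simp [pvMappingA] at hp
    rcases hp with rfl|rfl|rfl|rfl|rfl|rfl|rfl|rfl|rfl
    · exact not_prefix_of_take_ne (n := 12) (by decide) h1
    · exact not_prefix_of_take_ne (n := 11) (by decide) h2
    · exact not_prefix_of_take_ne (n := 12) (by decide) h3
    · exact not_prefix_of_take_ne (n := 15) (by decide) h4
    · exact not_prefix_of_take_ne (n := 18) (by decide) h5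
    · exact not_prefix_of_take_ne (n := 20) (by decide) h6
    · exact not_prefix_of_take_ne (n := 22) (by decide) h7
    · exact not_prefix_of_take_ne (n := 12) (by decide) h8
    · exact not_prefix_of_take_ne (n := 8) (by decide) h9
  rw [hnone]
  simp [pvLoopA, pvMappingA, S1, S2, S3, S4, S5, S6, S7, S8, S9, h1, h2, h3, h4, h5, h6, h7, h8, h9]

-- ===== VERDICT (by name: the statement is the Claim_ definition above) =====
theorem format_interface_label_py_spec : Claim_equal_format_interface_label_py := by
  intro name _
  unfold Spec_format_interface_label_py format_interface_label_py format_interface_label_py_alt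
  cases name with
  | none => rfl
  | some s => simp [loop_eq]
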